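-- pv_equiv track=rewrite | github.com/Akashdeepsingh1/project | ms/Min Steps to Make piles Equal Height.py | solution
-- ===== SOURCE A (Python) =====
-- def solution(n):
--     l = len(n)
--     if l <= 1:
--         return 0
--     n.sort()
--     count = 0
--     dnums = 0
--     for i in range(1,l):
--         if n[i]== n[i-1]:
--             count += dnums
--         else:
--             dnums+=1
--             count += dnums
--     return count
-- ===== SOURCE B (Python) =====
-- def solution(n):
--     if len(n) <= 1:
--         return 0
--     n.sort()  # same in-place mutation as A
--     distinct = sorted(set(n))
--     rank = {v: i for i, v in enumerate(distinct)}
--     return sum(rank[v] for v in n)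
-- ===== Notes on version B (the rewrite author's own statement) =====
-- stated objective: alternative
-- what changed: Replaces the adjacent-comparison loop with its running distinct counter by a rank table built from sorted(set(n)) (each value -> number of distinct values below it) and a single summation of ranks.
import Mathlib
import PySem

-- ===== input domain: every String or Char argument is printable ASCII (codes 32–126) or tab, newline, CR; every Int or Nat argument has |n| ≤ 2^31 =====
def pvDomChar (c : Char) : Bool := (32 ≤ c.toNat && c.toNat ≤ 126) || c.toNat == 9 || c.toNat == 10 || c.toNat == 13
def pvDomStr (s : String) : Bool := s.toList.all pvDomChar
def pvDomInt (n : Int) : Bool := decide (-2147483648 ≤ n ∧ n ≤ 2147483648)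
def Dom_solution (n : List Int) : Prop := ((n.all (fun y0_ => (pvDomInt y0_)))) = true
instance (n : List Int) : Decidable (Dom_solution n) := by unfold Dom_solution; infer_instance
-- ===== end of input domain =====

-- B replaces A's running distinct-counter loop by a rank table (value -> #distinct values below)
-- built from sorted(set(n)) plus one summation pass; same cost. Both A and B sort n in place
-- (the Python argument is mutated identically); the equivalence proved here is about the return value.

-- ===== PORT A =====
def solution (n : List Int) : Int :=
  let l : Int := n.length
  if l ≤ 1 then 0
  else
    -- n.sort(): the Python list n is sorted in place; s is its value from here on
    let s := PySem.List.sorted n (fun x => x) false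
    -- for i in range(1, l): if n[i] == n[i-1]: count += dnums else: dnums += 1; count += dnums
    -- (indices are always in range, so pyGetD's default is never used — exact)
    let r := (PySem.List.pyRange 1 l 1).foldl
      (fun (st : Int × Int) i =>
        if PySem.List.pyGetD s i 0 = PySem.List.pyGetD s (i - 1) 0
        then (st.1 + st.2, st.2)
        else (st.1 + st.2 + 1, st.2 + 1))
      (0, 0)
    r.1

-- ===== PORT B =====
def solution_alt (n : List Int) : Int :=
  if (n.length : Int) ≤ 1 then 0
  else
    -- n.sort(): from here the Python n holds the sorted value s
    let s := PySem.List.sorted n (fun x => x) false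
    -- distinct = sorted(set(n))
    let distinct := PySem.List.sorted (PySem.Set.ofList s) (fun x => x) false
    -- rank = {v: i for i, v in enumerate(distinct)}
    let rank := (PySem.List.enumerate distinct 0).foldl
      (fun (d : PySem.Dict Int Int) p => d.insert p.2 p.1) PySem.Dict.empty
    -- sum(rank[v] for v in n); every v in n is a key of rank, so the default is never used — exact
    (s.map (fun v => rank.getD v 0)).sum

-- ===== PRECONDITION & SPEC =====
def Spec_solution (n : List Int) (out : Int) : Prop := out = solution_alt n
instance (n : List Int) (out : Int) : Decidable (Spec_solution n out) := by unfold Spec_solution; infer_instance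

-- ===== CLAIM (what is proved, stated in full; the proofs are below) =====
def Claim_equal_solution : Prop := ∀ (n : List Int), Dom_solution n → Spec_solution n (solution n)

-- ===== LEMMAS AND PROOFS =====


def pvG (dn x : Int) : List Int → Int
  | [] => 0
  | y :: t => if y = x then dn + pvG dn y t else (dn + 1) + pvG (dn + 1) y t

lemma pvLoopA (L : List Int) : ∀ (t pre : List Int) (x c dn : Int), L = pre ++ x :: t →
    ((PySem.List.pyRange ((pre.length : Int) + 1) (L.length : Int) 1).foldl
       (fun (st : Int × Int) i =>
         if PySem.List.pyGetD L i 0 = PySem.List.pyGetD L (i - 1) 0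
         then (st.1 + st.2, st.2)
         else (st.1 + st.2 + 1, st.2 + 1)) (c, dn)).1
    = c + pvG dn x t := by
  intro t
  induction t with
  | nil =>
    intro pre x c dn hL
    have hlen : (L.length : Int) = pre.length + 1 := by subst hL; simp
    rw [hlen, PySem.List.pyRange_one_eq_nil (by omega)]
    simp [pvG]
  | cons y t' ih =>
    intro pre x c dn hL
    have hlen : (L.length : Int) = pre.length + 2 + t'.length := by subst hL; simp; omega
    have hcons : PySem.List.pyRange ((pre.length : Int) + 1) (L.length : Int) 1
        = ((pre.length : Int) + 1) :: PySem.List.pyRange ((pre.length : Int) + 1 + 1) (L.length : Int) 1 :=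
      PySem.List.pyRange_one_cons (by omega)
    have hget1 : PySem.List.pyGetD L ((pre.length : Int) + 1) 0 = y := by
      have : ((pre.length : Int) + 1) = ((pre.length + 1 : Nat) : Int) := by push_cast; ring
      rw [this, PySem.List.pyGetD_natCast, hL]
      rw [List.getD_eq_getElem?_getD, List.getElem?_append_right (by omega)]
      simp
    have hget0 : PySem.List.pyGetD L ((pre.length : Int) + 1 - 1) 0 = x := by
      have : ((pre.length : Int) + 1 - 1) = ((pre.length : Nat) : Int) := by ring
      rw [this, PySem.List.pyGetD_natCast, hL]
      rw [List.getD_eq_getElem?_getD, List.getElem?_append_right (by omega)]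
      simp
    have hL' : L = (pre ++ [x]) ++ y :: t' := by rw [hL]; simp
    have hstart : ((pre ++ [x]).length : Int) + 1 = (pre.length : Int) + 1 + 1 := by
      simp
    rw [hcons]
    simp only [List.foldl_cons, hget1, hget0]
    by_cases hxy : y = x
    · rw [if_pos hxy]
      have := ih (pre ++ [x]) y (c + dn) dn hL'
      rw [hstart] at this
      rw [this]
      subst hxy
      simp [pvG]
      ring
    · rw [if_neg hxy]
      have := ih (pre ++ [x]) y (c + dn + 1) (dn + 1) hL'
      rw [hstart] at this
      rw [this]
      simp [pvG, hxy]
      ring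


lemma pvRankEq (d : List Int) (hd : d.Nodup) (v : Int) (hv : v ∈ d) :
    ((PySem.List.enumerate d 0).foldl
       (fun (dd : PySem.Dict Int Int) p => dd.insert p.2 p.1) PySem.Dict.empty).getD v 0
    = (d.idxOf v : Int) := by
  have hitems : ((PySem.List.enumerate d 0).foldl
       (fun (dd : PySem.Dict Int Int) p => dd.insert p.2 p.1) PySem.Dict.empty).items
      = (PySem.List.enumerate d 0).map (fun p => (p.2, p.1)) := by
    have := PySem.Dict.items_foldl_insert_fresh (l := PySem.List.enumerate d 0)
      (k := fun p => p.2) (v := fun p => p.1) (d := PySem.Dict.empty)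
      (by intro a _; simp [PySem.Dict.contains_empty])
      (by rw [PySem.List.map_snd_enumerate]; exact hd)
    simpa using this
  have hklt : d.idxOf v < d.length := List.idxOf_lt_length_of_mem hv
  have hmem : ((d.idxOf v : Int), v) ∈ PySem.List.enumerate d 0 := by
    rw [PySem.List.mem_enumerate_iff]
    exact ⟨d.idxOf v, hklt, by simp [List.getElem_idxOf hklt]⟩
  have hmemitems : (v, (d.idxOf v : Int)) ∈ ((PySem.List.enumerate d 0).foldl
       (fun (dd : PySem.Dict Int Int) p => dd.insert p.2 p.1) PySem.Dict.empty).items := by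
    rw [hitems]
    exact List.mem_map.mpr ⟨_, hmem, rfl⟩
  have hnodup : ((List.foldl (fun dd p => dd.insert p.2 p.1) PySem.Dict.empty (PySem.List.enumerate d)).keys).Nodup := by
    show ((List.foldl (fun dd p => dd.insert p.2 p.1) PySem.Dict.empty (PySem.List.enumerate d)).items.map (·.1)).Nodup
    rw [hitems]
    rw [List.map_map]
    have h2 : List.map ((fun (x : Int × Int) => x.1) ∘ fun (p : Int × Int) => (p.2, p.1)) (PySem.List.enumerate d 0) = d :=
      PySem.List.map_snd_enumerate d 0
    rw [h2]; exact hd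
  exact PySem.Dict.getD_of_mem_items _ hmemitems hnodup 0


def pvD (s : List Int) : List Int := PySem.List.sorted (PySem.Set.ofList s) (fun x => x) false

lemma pvD_lt (s : List Int) : (pvD s).Pairwise (· < ·) :=
  PySem.List.sorted_ofList_pairwise_lt s

lemma pvD_mem (s : List Int) (w : Int) : w ∈ pvD s ↔ w ∈ s := by
  simp [pvD, PySem.List.mem_sorted, PySem.Set.mem_ofList]

lemma pvD_nodup (s : List Int) : (pvD s).Nodup :=
  (pvD_lt s).imp ne_of_lt

lemma pvIdxAdj (s : List Int) (hs : s.Pairwise (· ≤ ·)) (pre suf : List Int) (x y : Int)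
    (hsplit : s = pre ++ x :: y :: suf) (hxy : x < y) :
    (pvD s).idxOf y = (pvD s).idxOf x + 1 := by
  have hx : x ∈ pvD s := (pvD_mem s x).mpr (by rw [hsplit]; simp)
  have hy : y ∈ pvD s := (pvD_mem s y).mpr (by rw [hsplit]; simp)
  have hi : (pvD s).idxOf x < (pvD s).length := List.idxOf_lt_length_of_mem hx
  have hj : (pvD s).idxOf y < (pvD s).length := List.idxOf_lt_length_of_mem hy
  have hdi : (pvD s)[(pvD s).idxOf x] = x := List.getElem_idxOf hi
  have hdj : (pvD s)[(pvD s).idxOf y] = y := List.getElem_idxOf hj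
  have mono : ∀ (p q : Nat) (hp : p < (pvD s).length) (hq : q < (pvD s).length),
      p < q → (pvD s)[p] < (pvD s)[q] := by
    intro p q hp hq hpq
    exact List.pairwise_iff_getElem.mp (pvD_lt s) p q hp hq hpq
  have hij : (pvD s).idxOf x < (pvD s).idxOf y := by
    rcases lt_trichotomy ((pvD s).idxOf x) ((pvD s).idxOf y) with h | h | h
    · exact h
    · exfalso
      have h1 : (pvD s)[List.idxOf x (pvD s)]? = some x := by rw [List.getElem?_eq_getElem hi, hdi]
      have h2 : (pvD s)[List.idxOf y (pvD s)]? = some y := by rw [List.getElem?_eq_getElem hj, hdj]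
      rw [h, h2] at h1
      have : y = x := by injection h1
      omega
    · exfalso; have := mono _ _ hj hi h; rw [hdi, hdj] at this; omega
  by_contra hne
  have hlt : (pvD s).idxOf x + 1 < (pvD s).idxOf y := by omega
  have hw : (pvD s).idxOf x + 1 < (pvD s).length := by omega
  set w := (pvD s)[(pvD s).idxOf x + 1] with hwdef
  have hxw : x < w := by have := mono _ _ hi hw (by omega); rwa [hdi] at this
  have hwy : w < y := by have := mono _ _ hw hj hlt; rwa [hdj] at this
  have hws : w ∈ s := (pvD_mem s w).mp (List.getElem_mem hw)
  rw [hsplit] at hws hs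
  rcases List.mem_append.mp hws with hwpre | hwrest
  · have := (List.pairwise_append.mp hs).2.2 w hwpre x (by simp)
    omega
  · rcases List.mem_cons.mp hwrest with heq | hwrest
    · omega
    · rcases List.mem_cons.mp hwrest with heq | hwsuf
      · omega
      · have hp := (List.pairwise_append.mp hs).2.1
        have := (List.pairwise_cons.mp (List.pairwise_cons.mp hp).2).1 w hwsuf
        omega

lemma pvIdxHead (s : List Int) (hs : s.Pairwise (· ≤ ·)) (x : Int) (t : List Int)
    (h : s = x :: t) : (pvD s).idxOf x = 0 := by
  have hx : x ∈ pvD s := (pvD_mem s x).mpr (by rw [h]; simp)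
  have hi : (pvD s).idxOf x < (pvD s).length := List.idxOf_lt_length_of_mem hx
  have hdi : (pvD s)[(pvD s).idxOf x] = x := List.getElem_idxOf hi
  by_contra hne
  have h0 : 0 < (pvD s).length := by omega
  set m := (pvD s)[0] with hm
  have hlt : m < x := by
    have := List.pairwise_iff_getElem.mp (pvD_lt s) 0 ((pvD s).idxOf x) h0 hi (by omega)
    rwa [hdi] at this
  have hmem : m ∈ s := (pvD_mem s _).mp (List.getElem_mem h0)
  rw [h] at hmem hs
  rcases List.mem_cons.mp hmem with heq | hmem
  · omega
  · have := (List.pairwise_cons.mp hs).1 _ hmem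
    omega

lemma pvSum (s : List Int) (hs : s.Pairwise (· ≤ ·)) : ∀ (t pre : List Int) (x : Int),
    s = pre ++ x :: t →
    pvG ((pvD s).idxOf x : Int) x t = (t.map (fun v => ((pvD s).idxOf v : Int))).sum := by
  intro t
  induction t with
  | nil => intro pre x _; simp [pvG]
  | cons y t' ih =>
    intro pre x hsplit
    have hsplit' : s = (pre ++ [x]) ++ y :: t' := by rw [hsplit]; simp
    by_cases hxy : y = x
    · rw [show pvG ((pvD s).idxOf x : Int) x (y :: t')
          = (pvD s).idxOf x + pvG ((pvD s).idxOf x : Int) y t' by simp [pvG, hxy]]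
      rw [hxy] at hsplit' ⊢
      rw [ih (pre ++ [x]) x hsplit']
      simp
    · have hle : x ≤ y := by
        rw [hsplit] at hs
        exact (List.pairwise_cons.mp (List.pairwise_append.mp hs).2.1).1 y (by simp)
      have hlt : x < y := lt_of_le_of_ne hle (Ne.symm hxy)
      have hadj : (pvD s).idxOf y = (pvD s).idxOf x + 1 := pvIdxAdj s hs pre t' x y hsplit hlt
      rw [show pvG ((pvD s).idxOf x : Int) x (y :: t')
          = (((pvD s).idxOf x : Int) + 1) + pvG (((pvD s).idxOf x : Int) + 1) y t' by simp [pvG, hxy]]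
      have h2 : ((pvD s).idxOf x : Int) + 1 = ((pvD s).idxOf y : Int) := by rw [hadj]; push_cast; ring
      rw [h2, ih (pre ++ [x]) y hsplit']
      simp

theorem solution_spec : Claim_equal_solution := by
  intro n _
  unfold Spec_solution solution solution_alt
  by_cases h : (n.length : Int) ≤ 1
  · simp [h]
  · simp only [if_neg h]
    have hslen : (PySem.List.sorted n (fun x => x) false).length = n.length :=
      PySem.List.length_sorted n (fun x => x) false
    have hs : (PySem.List.sorted n (fun x => x) false).Pairwise (· ≤ ·) :=
      PySem.List.sorted_pairwise n (fun x => x)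
    obtain ⟨x, t, hcase⟩ : ∃ x t, PySem.List.sorted n (fun x => x) false = x :: t := by
      cases hc : PySem.List.sorted n (fun x => x) false with
      | nil => exfalso; rw [hc] at hslen; simp at hslen; omega
      | cons a b => exact ⟨a, b, rfl⟩
    · have hA := pvLoopA (PySem.List.sorted n (fun x => x) false) t [] x 0 0 (by simpa using hcase)
      simp only [List.length_nil, Nat.cast_zero, zero_add] at hA
      rw [hslen] at hA
      rw [hA]
      have hhead : (pvD (PySem.List.sorted n (fun x => x) false)).idxOf x = 0 :=
        pvIdxHead _ hs x t hcase
      have hmap : List.map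
          (fun v => ((PySem.List.enumerate (pvD (PySem.List.sorted n (fun x => x) false)) 0).foldl
            (fun (d : PySem.Dict Int Int) p => d.insert p.2 p.1) PySem.Dict.empty).getD v 0)
          (PySem.List.sorted n (fun x => x) false)
        = List.map (fun v => (((pvD (PySem.List.sorted n (fun x => x) false)).idxOf v : Nat) : Int))
          (PySem.List.sorted n (fun x => x) false) := by
        apply List.map_congr_left
        intro v hv
        exact pvRankEq _ (pvD_nodup _) v ((pvD_mem _ v).mpr hv)
      simp only [pvD] at hmap
      rw [hmap]
      have hsum := pvSum (PySem.List.sorted n (fun x => x) false) hs t [] x (by simpa using hcase)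
      simp only [pvD] at hhead hsum
      rw [hcase] at hhead hsum
      rw [hhead] at hsum
      simp only [Nat.cast_zero] at hsum
      conv_rhs => rw [hcase]
      rw [List.map_cons, List.sum_cons, hhead, hsum]
      simp
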